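-- pv_equiv track=rewrite | github.com/heckzi/Coding-Test | 프로그래머스/2/42586. 기능개발/기능개발.py | solution
-- ===== SOURCE A (Python) =====
-- def solution(progresses, speeds):
--     answer = []
--     release = 0
--     while progresses:
--         if progresses[0]>=100:
--             progresses.pop(0)
--             speeds.pop(0)
--             release +=1
--         else:
--             if release!=0:
--                 answer.append(release)
--                 release=0
--             for i in range(len(progresses)):
--                 progresses[i]+=speeds[i]
--     if release !=0:
--         answer.append(release)
--     return answer
-- ===== SOURCE B (Python) =====
-- def solution(progresses, speeds):
--     # per-feature completion day in closed form, then one grouping scan (no simulation, no mutation)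
--     days = [0 if p >= 100 else -((p - 100) // s) for p, s in zip(progresses, speeds)]
--     answer = []
--     while days:
--         head = days[0]
--         n = len(days)
--         k = 1
--         while k < n and days[k] <= head:
--             k += 1
--         answer.append(k)
--         days = days[k:]
--     return answer
-- ===== Notes on version B (the rewrite author's own statement) =====
-- stated objective: alternative
-- what changed: A simulates the deployment day by day, mutating the lists (incrementing every progress each day and pop(0)-shifting released features); B instead computes each feature's completion day in closed form with ceiling division and emits release-group sizes in one grouping scan over that list.
-- outside the precondition, e.g. on solution([100], [0]): A returns [1], B returns [1]
import Mathlib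
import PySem

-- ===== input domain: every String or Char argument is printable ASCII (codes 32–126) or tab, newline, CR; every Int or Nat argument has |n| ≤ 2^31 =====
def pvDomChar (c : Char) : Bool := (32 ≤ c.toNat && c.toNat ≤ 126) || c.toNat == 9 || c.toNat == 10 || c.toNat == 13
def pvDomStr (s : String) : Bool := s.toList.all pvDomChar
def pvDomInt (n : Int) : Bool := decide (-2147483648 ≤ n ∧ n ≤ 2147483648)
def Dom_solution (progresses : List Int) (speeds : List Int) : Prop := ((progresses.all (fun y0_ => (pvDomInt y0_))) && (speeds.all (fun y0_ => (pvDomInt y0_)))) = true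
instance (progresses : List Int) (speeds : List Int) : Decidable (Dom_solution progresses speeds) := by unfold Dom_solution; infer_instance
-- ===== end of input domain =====

-- B replaces A's day-by-day simulation by closed-form completion days plus one grouping scan (objective: alternative).
-- Python A mutates its list arguments (pop(0), in-place increments); B does not: the equivalence proved here is about the return value only.

-- ===== PORT A =====
-- A's while-loop as fuel recursion; the fuel is only a totality guard: under Pre_solution it strictly
-- exceeds the loop's iteration count (proved below), so the fuel-exhausted branch is never taken.
-- getD is exact here because under Pre_solution every accessed index is in range.
def loopA : Nat → List Int → List Int → List Int → Int → List Int
  | _, [], _, ans, rel => if rel ≠ 0 then ans ++ [rel] else ans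
  | 0, _ :: _, _, ans, rel => if rel ≠ 0 then ans ++ [rel] else ans
  | fuel + 1, p :: ps, ss, ans, rel =>
      if 100 ≤ p then
        -- progresses.pop(0); speeds.pop(0); release += 1
        loopA fuel ps ss.tail ans (rel + 1)
      else
        -- flush release, then progresses[i] += speeds[i] for i in range(len(progresses))
        loopA fuel ((List.range (p :: ps).length).map fun i => (p :: ps).getD i 0 + ss.getD i 0)
          ss (if rel ≠ 0 then ans ++ [rel] else ans) 0

def solution (progresses : List Int) (speeds : List Int) : List Int :=
  loopA (progresses.length + (progresses.map fun p => (100 - p).toNat).sum + 1) progresses speeds [] 0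

-- ===== PORT B =====
-- completion day of one feature: 0 if already done, else ceil((100-p)/s) = -((p-100)//s)
def pvDay (p s : Int) : Int := if 100 ≤ p then 0 else -(PySem.Int.floordiv (p - 100) s)

-- Source B's grouping loop: k = 1 + length of the prefix of the tail with day ≤ head; days = days[k:]
def groupRM : List Int → List Int
  | [] => []
  | d :: rest =>
      ((1 : Int) + (rest.takeWhile fun x => decide (x ≤ d)).length)
        :: groupRM (rest.dropWhile fun x => decide (x ≤ d))
  termination_by l => l.length
  decreasing_by simpa using Nat.lt_succ_of_le (List.length_dropWhile_le _ _)

def solution_alt (progresses : List Int) (speeds : List Int) : List Int :=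
  groupRM (List.zipWith pvDay progresses speeds)

-- ===== PRECONDITION & SPEC =====
-- Pre_solution excludes (a) progresses longer than speeds, where A raises IndexError, and (b) inputs
-- with a speed < 1 among the first len(progresses) speeds: on those A almost always loops forever
-- (any feature below 100 with such a speed never completes); in the residual cases where every such
-- feature already starts at >= 100, A returns and B agrees, but A's termination there has no simple
-- closed form, so those inputs are excluded too.
def Pre_solution (progresses : List Int) (speeds : List Int) : Prop :=
  progresses.length ≤ speeds.length ∧ ∀ s ∈ speeds.take progresses.length, 1 ≤ s
instance (progresses : List Int) (speeds : List Int) : Decidable (Pre_solution progresses speeds) := by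
  unfold Pre_solution; infer_instance

def pvWitness_solution : List Int × List Int := ([93, 30, 55], [1, 30, 5])

def Spec_solution (progresses : List Int) (speeds : List Int) (out : List Int) : Prop :=
  out = solution_alt progresses speeds
instance (progresses : List Int) (speeds : List Int) (out : List Int) : Decidable (Spec_solution progresses speeds out) := by unfold Spec_solution; infer_instance

-- ===== CLAIM (what is proved, stated in full; the proofs are below) =====
def Claim_equal_solution : Prop := ∀ (progresses : List Int) (speeds : List Int), Dom_solution progresses speeds → Pre_solution progresses speeds → Spec_solution progresses speeds (solution progresses speeds)

-- ===== LEMMAS AND PROOFS =====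

-- arithmetic facts about pvDay (all under 1 ≤ s)
theorem pvDay_hi {p s : Int} (h : 100 ≤ p) : pvDay p s = 0 := by simp [pvDay, h]

theorem pvDay_bracket {p s : Int} (hs : 1 ≤ s) (hp : p < 100) :
    (pvDay p s - 1) * s < 100 - p ∧ 100 - p ≤ pvDay p s * s := by
  have h := (PySem.Int.neg_floordiv_neg_eq_iff_of_pos (a := 100 - p) (b := s)
      (q := pvDay p s) (by omega)).mp
  apply h
  simp only [pvDay, if_neg (by omega : ¬ 100 ≤ p)]
  ring_nf

theorem pvDay_pos {p s : Int} (hs : 1 ≤ s) (hp : p < 100) : 1 ≤ pvDay p s := by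
  rcases pvDay_bracket hs hp with ⟨h1, h2⟩
  by_contra h
  push Not at h
  nlinarith

theorem pvDay_nonneg {p s : Int} (hs : 1 ≤ s) : 0 ≤ pvDay p s := by
  by_cases h : 100 ≤ p
  · simp [pvDay_hi h]
  · have := pvDay_pos (p := p) hs (by omega)
    omega

theorem pvDay_le {p s : Int} (hs : 1 ≤ s) : (pvDay p s).toNat ≤ (100 - p).toNat := by
  by_cases h : 100 ≤ p
  · simp [pvDay_hi h]
  · rcases pvDay_bracket (p := p) hs (by omega) with ⟨h1, h2⟩
    have hd := pvDay_pos (p := p) hs (by omega)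
    have : pvDay p s ≤ 100 - p := by nlinarith
    omega

theorem pvDay_step {p s : Int} (hs : 1 ≤ s) (hp : p < 100) :
    pvDay (p + s) s = pvDay p s - 1 := by
  rcases pvDay_bracket hs hp with ⟨h1, h2⟩
  by_cases h : 100 ≤ p + s
  · have hd1 : pvDay p s = 1 := by nlinarith [pvDay_pos hs hp]
    rw [pvDay_hi h, hd1]
    omega
  · have := (PySem.Int.neg_floordiv_neg_eq_iff_of_pos (a := 100 - (p + s)) (b := s)
        (q := pvDay p s - 1) (by omega)).mpr ⟨by nlinarith, by nlinarith⟩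
    calc pvDay (p + s) s = -(PySem.Int.floordiv (-(100 - (p + s))) s) := by
          simp only [pvDay, if_neg (by omega : ¬ 100 ≤ p + s)]; ring_nf
      _ = pvDay p s - 1 := this

-- capped decrement: one simulated day on a completion-day value
def decI (x : Int) : Int := if x ≤ 0 then x else x - 1

def sumT (l : List Int) : Nat := (l.map Int.toNat).sum

theorem sumT_decI_le (l : List Int) : sumT (l.map decI) ≤ sumT l := by
  induction l with
  | nil => simp [sumT]
  | cons d t ih =>
      simp only [List.map_cons, sumT, List.sum_cons] at *
      have : (decI d).toNat ≤ d.toNat := by unfold decI; split_ifs <;> omega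
      omega

-- A's in-place for-loop increment equals zipWith (+)
theorem range_step : ∀ (ps ss : List Int), ps.length ≤ ss.length →
    (List.range ps.length).map (fun i => ps.getD i 0 + ss.getD i 0) =
      List.zipWith (· + ·) ps ss := by
  intro ps
  induction ps with
  | nil => intro ss _; simp
  | cons p pt ih =>
      intro ss hlen
      cases ss with
      | nil => simp at hlen
      | cons s st =>
          simp only [List.length_cons, List.range_succ_eq_map, List.map_cons, List.map_map,
            List.zipWith_cons_cons]
          refine congrArg₂ _ rfl ?_
          have := ih st (by simpa using hlen)
          simpa using this

-- one simulated day sends the day list to its capped decrement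
theorem zip_step : ∀ (ps ss : List Int), (∀ s ∈ ss.take ps.length, 1 ≤ s) →
    List.zipWith pvDay (List.zipWith (· + ·) ps ss) ss =
      (List.zipWith pvDay ps ss).map decI := by
  intro ps
  induction ps with
  | nil => intro ss _; simp
  | cons p pt ih =>
      intro ss hs
      cases ss with
      | nil => simp
      | cons s st =>
          have hs1 : 1 ≤ s := hs s (by simp)
          have hrec := ih st (fun x hx => hs x (by simp [hx]))
          simp only [List.zipWith_cons_cons, List.map_cons, hrec]
          refine congrArg₂ _ ?_ rfl
          by_cases h : 100 ≤ p
          · rw [pvDay_hi h, pvDay_hi (by omega)]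
            simp [decI]
          · rw [pvDay_step hs1 (by omega)]
            have := pvDay_pos hs1 (by omega : p < 100)
            simp only [decI, if_neg (by omega : ¬ pvDay p s ≤ 0)]

theorem days_nonneg : ∀ (ps ss : List Int), (∀ s ∈ ss.take ps.length, 1 ≤ s) →
    ∀ x ∈ List.zipWith pvDay ps ss, 0 ≤ x := by
  intro ps
  induction ps with
  | nil => intro ss _ x hx; simp at hx
  | cons p pt ih =>
      intro ss hs x hx
      cases ss with
      | nil => simp at hx
      | cons s st =>
          simp only [List.zipWith_cons_cons, List.mem_cons] at hx
          rcases hx with h | h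
          · exact h ▸ pvDay_nonneg (hs s (by simp))
          · exact ih st (fun y hy => hs y (by simp [hy])) x h

theorem sumT_days_le : ∀ (ps ss : List Int), (∀ s ∈ ss.take ps.length, 1 ≤ s) →
    sumT (List.zipWith pvDay ps ss) ≤ (ps.map fun p => (100 - p).toNat).sum := by
  intro ps
  induction ps with
  | nil => intro ss _; simp [sumT]
  | cons p pt ih =>
      intro ss hs
      cases ss with
      | nil => simp [sumT]
      | cons s st =>
          have := ih st (fun y hy => hs y (by simp [hy]))
          have hd := pvDay_le (p := p) (hs s (by simp))
          simp only [List.zipWith_cons_cons, List.map_cons, sumT, List.sum_cons] at *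
          omega

-- abstract release loop on the day list (proof-side mirror of loopA without fuel)
def pops : List Int → Int → List Int
  | [], rel => if rel ≠ 0 then [rel] else []
  | d :: ds, rel =>
      if d ≤ 0 then pops ds (rel + 1)
      else (if rel ≠ 0 then [rel] else []) ++ pops ((d :: ds).map decI) 0
  termination_by l _ => sumT l + l.length
  decreasing_by
  · simp only [sumT, List.map_cons, List.sum_cons, List.length_cons]; omega
  · have h1 := sumT_decI_le ds
    have h2 : (decI d).toNat < d.toNat := by unfold decI; split_ifs <;> omega
    simp only [sumT, List.map_cons, List.sum_cons, List.length_cons, List.length_map] at h1 h2 ⊢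
    omega

theorem loopA_eq_pops : ∀ (fuel : Nat) (ps ss ans : List Int) (rel : Int),
    ps.length ≤ ss.length → (∀ s ∈ ss.take ps.length, 1 ≤ s) →
    sumT (List.zipWith pvDay ps ss) + ps.length < fuel →
    loopA fuel ps ss ans rel = ans ++ pops (List.zipWith pvDay ps ss) rel := by
  intro fuel
  induction fuel with
  | zero => intro ps ss ans rel _ _ hf; omega
  | succ f ih =>
    intro ps ss ans rel hlen hs hf
    cases ps with
    | nil =>
        show (if rel ≠ 0 then ans ++ [rel] else ans) = ans ++ pops [] rel
        rw [pops]
        split_ifs <;> simp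
    | cons p pt =>
      cases ss with
      | nil => simp at hlen
      | cons s st =>
        have hs1 : 1 ≤ s := hs s (by simp)
        have hcons : List.zipWith pvDay (p :: pt) (s :: st) =
            pvDay p s :: List.zipWith pvDay pt st := by simp
        by_cases hp : 100 ≤ p
        · have hd0 : pvDay p s = 0 := pvDay_hi hp
          rw [show loopA (f + 1) (p :: pt) (s :: st) ans rel = loopA f pt st ans (rel + 1) from by
            simp [loopA, hp]]
          have hfu : sumT (List.zipWith pvDay pt st) + pt.length < f := by
            rw [hcons] at hf
            simp only [sumT, List.map_cons, List.sum_cons, List.length_cons, hd0] at hf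
            simpa [sumT] using hf
          rw [ih pt st ans (rel + 1) (by simpa using hlen) (fun y hy => hs y (by simp [hy])) hfu]
          rw [hcons, hd0, show pops (0 :: List.zipWith pvDay pt st) rel =
            pops (List.zipWith pvDay pt st) (rel + 1) from by rw [pops]; simp]
        · have hd1 : 1 ≤ pvDay p s := pvDay_pos hs1 (by omega)
          rw [show loopA (f + 1) (p :: pt) (s :: st) ans rel =
              loopA f ((List.range (p :: pt).length).map
                  fun i => (p :: pt).getD i 0 + (s :: st).getD i 0)
                (s :: st) (if rel ≠ 0 then ans ++ [rel] else ans) 0 from by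
            simp only [loopA, if_neg hp]]
          rw [range_step _ _ hlen]
          have hlenz : (List.zipWith (· + ·) (p :: pt) (s :: st)).length = (p :: pt).length := by
            simp only [List.length_zipWith]
            omega
          have hz := zip_step (p :: pt) (s :: st) hs
          have hfu : sumT (List.zipWith pvDay (List.zipWith (· + ·) (p :: pt) (s :: st)) (s :: st))
              + (List.zipWith (· + ·) (p :: pt) (s :: st)).length < f := by
            rw [hz, hlenz, hcons]
            rw [hcons] at hf
            have hle := sumT_decI_le (List.zipWith pvDay pt st)
            have hh : (decI (pvDay p s)).toNat < (pvDay p s).toNat := by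
              unfold decI; split_ifs <;> omega
            simp only [List.map_cons, sumT, List.sum_cons, List.length_cons] at hf hle ⊢
            omega
          rw [ih _ (s :: st) _ 0 (by rw [hlenz]; exact hlen)
            (by rw [hlenz]; exact hs) hfu, hz, hcons]
          rw [show pops (pvDay p s :: List.zipWith pvDay pt st) rel =
              (if rel ≠ 0 then [rel] else []) ++
                pops ((pvDay p s :: List.zipWith pvDay pt st).map decI) 0 from by
            rw [pops]; rw [if_neg (by omega)]]
          split_ifs <;> simp

theorem head?_dropWhile_false {α : Type} (p : α → Bool) :
    ∀ (l : List α) (x : α), (l.dropWhile p).head? = some x → p x = false := by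
  intro l
  induction l with
  | nil => intro x h; simp at h
  | cons a t ih =>
      intro x h
      by_cases hp : p a
      · rw [List.dropWhile_cons_of_pos hp] at h
        exact ih x h
      · rw [List.dropWhile_cons_of_neg (by simpa using hp)] at h
        simp only [List.head?_cons, Option.some.injEq] at h
        subst h
        simpa using hp

theorem groupRM_decI : ∀ (n : Nat) (l : List Int), l.length ≤ n →
    (∀ d, l.head? = some d → 1 ≤ d) → groupRM (l.map decI) = groupRM l := by
  intro n
  induction n with
  | zero =>
      intro l hlen _
      cases l with
      | nil => simp
      | cons d t => simp at hlen
  | succ n ih =>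
      intro l hlen hhead
      cases l with
      | nil => simp
      | cons d t =>
        have hd : 1 ≤ d := hhead d rfl
        rw [show (d :: t).map decI = decI d :: t.map decI from rfl, groupRM, groupRM]
        have hpred : ((fun x => decide (x ≤ decI d)) ∘ decI) = fun x => decide (x ≤ d) := by
          funext x
          simp only [Function.comp, decide_eq_decide]
          unfold decI
          split_ifs <;> omega
        rw [List.takeWhile_map, List.dropWhile_map, hpred]
        refine congrArg₂ _ (by simp) ?_
        apply ih
        · have := List.length_dropWhile_le (fun x => decide (x ≤ d)) t
          simp only [List.length_cons] at hlen
          omega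
        · intro d' hd'
          have := head?_dropWhile_false _ t d' hd'
          simp only [decide_eq_false_iff_not] at this
          omega

theorem pops_eq_groupRM : ∀ (n : Nat) (l : List Int) (rel : Int),
    sumT l + l.length ≤ n → (∀ x ∈ l, 0 ≤ x) →
    pops l rel =
      (if rel + ((l.takeWhile fun x => decide (x ≤ 0)).length : Int) ≠ 0 then
        [rel + ((l.takeWhile fun x => decide (x ≤ 0)).length : Int)] else [])
        ++ groupRM (l.dropWhile fun x => decide (x ≤ 0)) := by
  intro n
  induction n with
  | zero =>
      intro l rel hn _
      cases l with
      | nil => rw [pops]; simp [groupRM]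
      | cons d t => simp [sumT] at hn
  | succ n ih =>
      intro l rel hn hnonneg
      cases l with
      | nil => rw [pops]; simp [groupRM]
      | cons d t =>
        by_cases hd : d ≤ 0
        · have hd0 : d = 0 := le_antisymm hd (hnonneg d (by simp))
          subst hd0
          rw [show pops (0 :: t) rel = pops t (rel + 1) from by rw [pops]; simp]
          rw [ih t (rel + 1) (by simp only [sumT, List.map_cons, List.sum_cons,
              List.length_cons] at hn ⊢; omega)
            (fun x hx => hnonneg x (by simp [hx]))]
          rw [List.takeWhile_cons_of_pos (by simp), List.dropWhile_cons_of_pos (by simp)]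
          have harith : rel + 1 + ((t.takeWhile fun x => decide (x ≤ 0)).length : Int) =
              rel + (((0 :: (t.takeWhile fun x => decide (x ≤ 0))).length : Nat) : Int) := by
            simp only [List.length_cons]
            push_cast
            ring
          rw [harith]
        · rw [show pops (d :: t) rel = (if rel ≠ 0 then [rel] else []) ++
              pops ((d :: t).map decI) 0 from by rw [pops]; rw [if_neg hd]]
          have hmes : sumT ((d :: t).map decI) + ((d :: t).map decI).length ≤ n := by
            have h1 := sumT_decI_le t
            have h2 : (decI d).toNat < d.toNat := by unfold decI; split_ifs <;> omega
            simp only [sumT, List.map_cons, List.sum_cons, List.length_cons,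
              List.length_map] at hn h1 ⊢
            omega
          have hnn : ∀ x ∈ (d :: t).map decI, 0 ≤ x := by
            intro x hx
            simp only [List.mem_map] at hx
            obtain ⟨y, hy, rfl⟩ := hx
            have := hnonneg y hy
            unfold decI
            split_ifs <;> omega
          rw [ih _ 0 hmes hnn]
          rw [List.takeWhile_cons_of_neg (by simpa using hd),
            List.dropWhile_cons_of_neg (by simpa using hd)]
          simp only [List.length_nil, Nat.cast_zero, add_zero]
          refine congrArg₂ _ rfl ?_
          by_cases h2 : d ≤ 1
          · have hd1 : d = 1 := by omega
            subst hd1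
            have hpred0 : ((fun x => decide (x ≤ 0)) ∘ decI) = fun x => decide (x ≤ 1) := by
              funext x
              simp only [Function.comp, decide_eq_decide]
              unfold decI
              split_ifs <;> omega
            rw [show ((1 : Int) :: t).map decI = decI 1 :: t.map decI from rfl]
            rw [List.takeWhile_cons_of_pos (by norm_num [decI]),
              List.dropWhile_cons_of_pos (by norm_num [decI])]
            rw [List.takeWhile_map, List.dropWhile_map, hpred0]
            rw [groupRM_decI (t.dropWhile fun x => decide (x ≤ 1)).length _ le_rfl
              (by
                intro d' hd'
                have := head?_dropWhile_false _ t d' hd'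
                simp only [decide_eq_false_iff_not] at this
                omega)]
            rw [show groupRM ((1 : Int) :: t) =
                ((1 : Int) + (t.takeWhile fun x => decide (x ≤ 1)).length)
                  :: groupRM (t.dropWhile fun x => decide (x ≤ 1)) from by rw [groupRM]]
            rw [if_pos (by simp only [List.length_cons]; omega)]
            simp only [List.length_cons, List.length_map, List.singleton_append]
            refine congrArg₂ _ ?_ rfl
            push_cast
            ring
          · have hdec : decI d = d - 1 := by unfold decI; split_ifs <;> omega
            rw [show (d :: t).map decI = decI d :: t.map decI from rfl]
            rw [List.takeWhile_cons_of_neg (by simp only [decide_eq_true_eq, hdec]; omega),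
              List.dropWhile_cons_of_neg (by simp only [decide_eq_true_eq, hdec]; omega)]
            rw [show (decI d :: t.map decI) = (d :: t).map decI from rfl]
            rw [groupRM_decI (d :: t).length _ le_rfl
              (by intro d' hd'; simp only [List.head?_cons, Option.some.injEq] at hd'; omega)]
            simp

theorem pops_zero (l : List Int) (hn : ∀ x ∈ l, 0 ≤ x) : pops l 0 = groupRM l := by
  cases l with
  | nil => rw [pops]; simp [groupRM]
  | cons d t =>
    rw [pops_eq_groupRM (sumT (d :: t) + (d :: t).length) _ 0 le_rfl hn]
    by_cases hd : d ≤ 0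
    · have hd0 : d = 0 := le_antisymm hd (hn d (by simp))
      subst hd0
      rw [List.takeWhile_cons_of_pos (by simp), List.dropWhile_cons_of_pos (by simp)]
      rw [show groupRM ((0 : Int) :: t) =
          ((1 : Int) + (t.takeWhile fun x => decide (x ≤ 0)).length)
            :: groupRM (t.dropWhile fun x => decide (x ≤ 0)) from by rw [groupRM]]
      rw [if_pos (by simp only [List.length_cons]; omega)]
      simp only [List.length_cons, List.singleton_append]
      refine congrArg₂ _ ?_ rfl
      push_cast
      ring
    · rw [List.takeWhile_cons_of_neg (by simpa using hd),
        List.dropWhile_cons_of_neg (by simpa using hd)]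
      simp

-- ===== VERDICT (by name: the statement is the Claim_ definition above) =====
theorem solution_spec : Claim_equal_solution := by
  intro ps ss _ hpre
  rcases hpre with ⟨hlen, hs⟩
  unfold Spec_solution solution solution_alt
  rw [loopA_eq_pops _ ps ss [] 0 hlen hs (by have := sumT_days_le ps ss hs; omega)]
  rw [pops_zero _ (days_nonneg ps ss hs)]
  simp
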